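-- pv_equiv track=rewrite | github.com/ryanmaclean/skills | autoresearch-skills/evals/assertions.py | skill_specific_assertions
-- ===== SOURCE A (Python) =====
-- from typing import Dict, List, Any, Tuple
--
-- def skill_specific_assertions(skill_name: str, input_text: str, response: str, metadata: Dict[str, Any]) -> List[Tuple[bool, str]]:
--     """Run skill-specific assertions."""
--     assertions = []
--
--     if skill_name == "ansible-fleet":
--         # Should mention Ansible-specific concepts
--         ansible_terms = ["ansible", "playbook", "inventory", "hosts"]
--         if not any(term in response.lower() for term in ansible_terms):
--             assertions.append((False, "Missing Ansible-specific terminology"))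
--         else:
--             assertions.append((True, "Ansible terminology present"))
--
--     elif skill_name == "ollama-deploy":
--         # Should mention Ollama-specific concepts
--         ollama_terms = ["ollama", "model", "llm", "pull"]
--         if not any(term in response.lower() for term in ollama_terms):
--             assertions.append((False, "Missing Ollama-specific terminology"))
--         else:
--             assertions.append((True, "Ollama terminology present"))
--
--     elif skill_name == "raspberry-pi":
--         # Should mention Pi-specific concepts
--         pi_terms = ["raspberry", "pi", "arm64", "ubuntu", "raspios"]
--         if not any(term in response.lower() for term in pi_terms):
--             assertions.append((False, "Missing Raspberry Pi-specific terminology"))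
--         else:
--             assertions.append((True, "Raspberry Pi terminology present"))
--
--     elif skill_name == "zellij":
--         # Should mention Zellij-specific concepts
--         zellij_terms = ["zellij", "session", "pane", "layout"]
--         if not any(term in response.lower() for term in zellij_terms):
--             assertions.append((False, "Missing Zellij-specific terminology"))
--         else:
--             assertions.append((True, "Zellij terminology present"))
--
--     return assertions
-- ===== SOURCE B (Python) =====
-- # Flat inverted index: every keyword row carries its skill; one pass over ALL rows
-- # builds the set of skills whose vocabulary occurs, then the query is a set lookup.
-- TERM_INDEX = [
--     ("ansible", "ansible-fleet"), ("playbook", "ansible-fleet"),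
--     ("inventory", "ansible-fleet"), ("hosts", "ansible-fleet"),
--     ("ollama", "ollama-deploy"), ("model", "ollama-deploy"),
--     ("llm", "ollama-deploy"), ("pull", "ollama-deploy"),
--     ("raspberry", "raspberry-pi"), ("pi", "raspberry-pi"),
--     ("arm64", "raspberry-pi"), ("ubuntu", "raspberry-pi"),
--     ("raspios", "raspberry-pi"),
--     ("zellij", "zellij"), ("session", "zellij"),
--     ("pane", "zellij"), ("layout", "zellij"),
-- ]
--
-- MESSAGES = {
--     "ansible-fleet": ("Ansible terminology present", "Missing Ansible-specific terminology"),
--     "ollama-deploy": ("Ollama terminology present", "Missing Ollama-specific terminology"),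
--     "raspberry-pi": ("Raspberry Pi terminology present", "Missing Raspberry Pi-specific terminology"),
--     "zellij": ("Zellij terminology present", "Missing Zellij-specific terminology"),
-- }
--
-- def skill_specific_assertions(skill_name, input_text, response, metadata):
--     msgs = MESSAGES.get(skill_name)
--     if msgs is None:
--         return []
--     text = response.lower()
--     hit_skills = set(skill for term, skill in TERM_INDEX if term in text)
--     if skill_name in hit_skills:
--         return [(True, msgs[0])]
--     return [(False, msgs[1])]
-- ===== Notes on version B (the rewrite author's own statement) =====
-- stated objective: alternative
-- what changed: Replaces the four-branch if/elif chain (each with its own per-skill term scan) by a flat inverted keyword->skill index scanned once to build the set of skills whose vocabulary occurs in the response, after which the answer is a set-membership test plus a message table lookup.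
import Mathlib
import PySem

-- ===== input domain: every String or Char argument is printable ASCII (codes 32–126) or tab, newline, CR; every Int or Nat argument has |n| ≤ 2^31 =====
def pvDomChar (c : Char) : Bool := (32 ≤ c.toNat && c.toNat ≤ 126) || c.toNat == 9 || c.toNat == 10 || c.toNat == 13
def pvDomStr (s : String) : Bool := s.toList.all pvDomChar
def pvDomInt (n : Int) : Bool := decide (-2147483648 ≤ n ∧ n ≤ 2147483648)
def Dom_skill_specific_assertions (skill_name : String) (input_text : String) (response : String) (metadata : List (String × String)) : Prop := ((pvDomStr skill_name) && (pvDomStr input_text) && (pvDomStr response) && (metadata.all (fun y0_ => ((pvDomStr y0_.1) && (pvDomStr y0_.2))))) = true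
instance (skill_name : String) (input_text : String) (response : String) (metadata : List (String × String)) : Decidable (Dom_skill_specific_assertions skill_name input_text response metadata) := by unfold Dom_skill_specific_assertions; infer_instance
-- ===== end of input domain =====

-- B replaces A's four-branch if/elif chain (each with its own per-skill term scan) by one flat inverted keyword->skill index scanned once into a hit-set, plus a message table (alternative decomposition, same results).


-- ===== PORT A =====
def skill_specific_assertions (skill_name : String) (input_text : String) (response : String) (metadata : List (String × String)) : List (Bool × String) :=
  let assertions : List (Bool × String) := []
  if skill_name == "ansible-fleet" then
    let ansible_terms := ["ansible", "playbook", "inventory", "hosts"]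
    if !(ansible_terms.any (fun term => PySem.Str.isIn term (PySem.Str.lower response))) then
      assertions ++ [(false, "Missing Ansible-specific terminology")]
    else
      assertions ++ [(true, "Ansible terminology present")]
  else if skill_name == "ollama-deploy" then
    let ollama_terms := ["ollama", "model", "llm", "pull"]
    if !(ollama_terms.any (fun term => PySem.Str.isIn term (PySem.Str.lower response))) then
      assertions ++ [(false, "Missing Ollama-specific terminology")]
    else
      assertions ++ [(true, "Ollama terminology present")]
  else if skill_name == "raspberry-pi" then
    let pi_terms := ["raspberry", "pi", "arm64", "ubuntu", "raspios"]
    if !(pi_terms.any (fun term => PySem.Str.isIn term (PySem.Str.lower response))) then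
      assertions ++ [(false, "Missing Raspberry Pi-specific terminology")]
    else
      assertions ++ [(true, "Raspberry Pi terminology present")]
  else if skill_name == "zellij" then
    let zellij_terms := ["zellij", "session", "pane", "layout"]
    if !(zellij_terms.any (fun term => PySem.Str.isIn term (PySem.Str.lower response))) then
      assertions ++ [(false, "Missing Zellij-specific terminology")]
    else
      assertions ++ [(true, "Zellij terminology present")]
  else
    assertions

-- ===== PORT B =====
-- B: flat inverted keyword->skill index; one pass builds the hit-set of skills, then a membership test
def pvTermIndex : List (String × String) :=
  [("ansible", "ansible-fleet"), ("playbook", "ansible-fleet"),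
   ("inventory", "ansible-fleet"), ("hosts", "ansible-fleet"),
   ("ollama", "ollama-deploy"), ("model", "ollama-deploy"),
   ("llm", "ollama-deploy"), ("pull", "ollama-deploy"),
   ("raspberry", "raspberry-pi"), ("pi", "raspberry-pi"),
   ("arm64", "raspberry-pi"), ("ubuntu", "raspberry-pi"),
   ("raspios", "raspberry-pi"),
   ("zellij", "zellij"), ("session", "zellij"),
   ("pane", "zellij"), ("layout", "zellij")]

def pvMessages : PySem.Dict String (String × String) :=
  PySem.Dict.ofList
  [("ansible-fleet", ("Ansible terminology present", "Missing Ansible-specific terminology")),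
   ("ollama-deploy", ("Ollama terminology present", "Missing Ollama-specific terminology")),
   ("raspberry-pi", ("Raspberry Pi terminology present", "Missing Raspberry Pi-specific terminology")),
   ("zellij", ("Zellij terminology present", "Missing Zellij-specific terminology"))]

def skill_specific_assertions_alt (skill_name : String) (input_text : String) (response : String) (metadata : List (String × String)) : List (Bool × String) :=
  match PySem.Dict.get? pvMessages skill_name with
  | none => []
  | some msgs =>
    let text := PySem.Str.lower response
    let hit_skills : PySem.Set String :=
      PySem.Set.ofList ((pvTermIndex.filter (fun p => PySem.Str.isIn p.1 text)).map Prod.snd)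
    if PySem.Set.contains hit_skills skill_name then [(true, msgs.1)]
    else [(false, msgs.2)]

-- ===== PRECONDITION & SPEC =====
def Spec_skill_specific_assertions (skill_name : String) (input_text : String) (response : String) (metadata : List (String × String)) (out : List (Bool × String)) : Prop := out = skill_specific_assertions_alt skill_name input_text response metadata
instance (skill_name : String) (input_text : String) (response : String) (metadata : List (String × String)) (out : List (Bool × String)) : Decidable (Spec_skill_specific_assertions skill_name input_text response metadata out) := by unfold Spec_skill_specific_assertions; infer_instance

-- ===== CLAIM =====
def Claim_equal_skill_specific_assertions : Prop := ∀ (skill_name : String) (input_text : String) (response : String) (metadata : List (String × String)), Dom_skill_specific_assertions skill_name input_text response metadata → Spec_skill_specific_assertions skill_name input_text response metadata (skill_specific_assertions skill_name input_text response metadata)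

-- ===== LEMMAS AND PROOFS =====
-- membership of a fixed skill in B's hit-set = "some row of the index with that skill matched"
theorem pv_hit_mem (s : String) (text : String) :
    PySem.Set.contains
      (PySem.Set.ofList ((pvTermIndex.filter (fun p => PySem.Str.isIn p.1 text)).map Prod.snd)) s
      = pvTermIndex.any (fun p => (p.2 == s) && PySem.Str.isIn p.1 text) := by
  rw [Bool.eq_iff_iff, PySem.Set.contains_iff, PySem.Set.mem_ofList, List.mem_map, List.any_eq_true]
  constructor
  · rintro ⟨p, hp, rfl⟩
    obtain ⟨hpm, hpi⟩ := List.mem_filter.mp hp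
    exact ⟨p, hpm, by simpa using hpi⟩
  · rintro ⟨p, hp, h⟩
    simp only [Bool.and_eq_true, beq_iff_eq] at h
    exact ⟨p, List.mem_filter.mpr ⟨hp, h.2⟩, h.1⟩

-- the flat-index scan restricted to one skill equals that skill's term list
theorem pv_any_ansible (text : String) :
    pvTermIndex.any (fun p => (p.2 == "ansible-fleet") && PySem.Str.isIn p.1 text)
    = ["ansible", "playbook", "inventory", "hosts"].any (fun t => PySem.Str.isIn t text) := by
  simp only [pvTermIndex, List.any_cons, List.any_nil]; simp

theorem pv_any_ollama (text : String) :
    pvTermIndex.any (fun p => (p.2 == "ollama-deploy") && PySem.Str.isIn p.1 text)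
    = ["ollama", "model", "llm", "pull"].any (fun t => PySem.Str.isIn t text) := by
  simp only [pvTermIndex, List.any_cons, List.any_nil]; simp

theorem pv_any_pi (text : String) :
    pvTermIndex.any (fun p => (p.2 == "raspberry-pi") && PySem.Str.isIn p.1 text)
    = ["raspberry", "pi", "arm64", "ubuntu", "raspios"].any (fun t => PySem.Str.isIn t text) := by
  simp only [pvTermIndex, List.any_cons, List.any_nil]; simp

theorem pv_any_zellij (text : String) :
    pvTermIndex.any (fun p => (p.2 == "zellij") && PySem.Str.isIn p.1 text)
    = ["zellij", "session", "pane", "layout"].any (fun t => PySem.Str.isIn t text) := by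
  simp only [pvTermIndex, List.any_cons, List.any_nil]; simp

-- ===== VERDICT =====
theorem skill_specific_assertions_spec : Claim_equal_skill_specific_assertions := by
  intro skill_name input_text response metadata _
  unfold Spec_skill_specific_assertions skill_specific_assertions skill_specific_assertions_alt
  simp only [pv_hit_mem]
  by_cases h1 : skill_name = "ansible-fleet"
  · subst h1
    simp only [pv_any_ansible, pvMessages, PySem.Dict.get?, PySem.Dict.ofList]
    cases h : ["ansible", "playbook", "inventory", "hosts"].any
        (fun t => PySem.Str.isIn t (PySem.Str.lower response)) <;> (simp only [h, Bool.not_false, Bool.not_true]; rfl)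
  by_cases h2 : skill_name = "ollama-deploy"
  · subst h2
    simp only [pv_any_ollama, pvMessages, PySem.Dict.get?, PySem.Dict.ofList]
    cases h : ["ollama", "model", "llm", "pull"].any
        (fun t => PySem.Str.isIn t (PySem.Str.lower response)) <;> (simp only [h, Bool.not_false, Bool.not_true]; rfl)
  by_cases h3 : skill_name = "raspberry-pi"
  · subst h3
    simp only [pv_any_pi, pvMessages, PySem.Dict.get?, PySem.Dict.ofList]
    cases h : ["raspberry", "pi", "arm64", "ubuntu", "raspios"].any
        (fun t => PySem.Str.isIn t (PySem.Str.lower response)) <;> (simp only [h, Bool.not_false, Bool.not_true]; rfl)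
  by_cases h4 : skill_name = "zellij"
  · subst h4
    simp only [pv_any_zellij, pvMessages, PySem.Dict.get?, PySem.Dict.ofList]
    cases h : ["zellij", "session", "pane", "layout"].any
        (fun t => PySem.Str.isIn t (PySem.Str.lower response)) <;> (simp only [h, Bool.not_false, Bool.not_true]; rfl)
  · have hi : pvMessages.items =
      [("ansible-fleet", ("Ansible terminology present", "Missing Ansible-specific terminology")),
       ("ollama-deploy", ("Ollama terminology present", "Missing Ollama-specific terminology")),
       ("raspberry-pi", ("Raspberry Pi terminology present", "Missing Raspberry Pi-specific terminology")),
       ("zellij", ("Zellij terminology present", "Missing Zellij-specific terminology"))] := rfl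
    have e1 : ("ansible-fleet" == skill_name) = false := by simp [Ne.symm h1]
    have e2 : ("ollama-deploy" == skill_name) = false := by simp [Ne.symm h2]
    have e3 : ("raspberry-pi" == skill_name) = false := by simp [Ne.symm h3]
    have e4 : ("zellij" == skill_name) = false := by simp [Ne.symm h4]
    have f1 : (skill_name == "ansible-fleet") = false := by simp [h1]
    have f2 : (skill_name == "ollama-deploy") = false := by simp [h2]
    have f3 : (skill_name == "raspberry-pi") = false := by simp [h3]
    have f4 : (skill_name == "zellij") = false := by simp [h4]
    simp only [PySem.Dict.get?, hi, List.find?, e1, e2, e3, e4, f1, f2, f3, f4, Bool.false_eq_true]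
    rfl
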